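-- pv_equiv track=rewrite | github.com/serinachang5/gi-user-topic | markov_preprocessing.py | find_continuous_intervals
-- ===== SOURCE A (Python) =====
-- def next_day(date):
--     y0, m0, d0 = [int(tok) for tok in date.split('-')]
--     y1, m1, d1 = y0, m0, d0
--     if d0 == 28 and m0 == 4 and y0 % 4 != 0:  # 4/28/yy to 5/1/yy in non-leap year
--         d1 = 1
--         m1 += 1
--     elif d0 == 29 and m0 == 4:  # 4/29/yy to 5/1/yy in leap year
--         d1 = 1
--         m1 += 1
--     elif d0 == 30 and m0 in {2, 4, 6, 9, 11}:  # -/30/yy to -/1/yy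
--         d1 = 1
--         m1 += 1
--     elif d0 == 31 and m0 in {1, 3, 5, 7, 8, 10}:  # -/31/yy to -/1/yy
--         d1 = 1
--         m1 += 1
--     elif d0 == 31 and m0 == 12:  # new year's
--         d1 = 1
--         m1 = 1
--         y1 += 1
--     else:  # just a normal increment
--         d1 += 1
--     y1, m1, d1 = str(y1), str(m1), str(d1)
--     if len(m1) == 1:
--         m1 = '0' + m1
--     if len(d1) == 1:
--         d1 = '0' + d1
--     if len(y1) == 2:
--         y1 = '20' + y1
--     return '{}-{}-{}'.format(y1, m1, d1)
--
-- def find_continuous_intervals(sorted_dates):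
--     intervals = []
--     i = 0
--     while i < len(sorted_dates):
--         j = i
--         while j < len(sorted_dates)-1 and \
--                         sorted_dates[j+1] in {sorted_dates[j], next_day(sorted_dates[j])}:  # either same day or next day
--             j += 1
--         intervals.append((i, j))
--         i = j+1
--     return intervals
-- ===== SOURCE B (Python) =====
-- def next_day(date):
--     y0, m0, d0 = [int(tok) for tok in date.split('-')]
--     y1, m1, d1 = y0, m0, d0
--     if d0 == 28 and m0 == 4 and y0 % 4 != 0:  # 4/28/yy to 5/1/yy in non-leap year
--         d1 = 1
--         m1 += 1
--     elif d0 == 29 and m0 == 4:  # 4/29/yy to 5/1/yy in leap year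
--         d1 = 1
--         m1 += 1
--     elif d0 == 30 and m0 in {2, 4, 6, 9, 11}:  # -/30/yy to -/1/yy
--         d1 = 1
--         m1 += 1
--     elif d0 == 31 and m0 in {1, 3, 5, 7, 8, 10}:  # -/31/yy to -/1/yy
--         d1 = 1
--         m1 += 1
--     elif d0 == 31 and m0 == 12:  # new year's
--         d1 = 1
--         m1 = 1
--         y1 += 1
--     else:  # just a normal increment
--         d1 += 1
--     y1, m1, d1 = str(y1), str(m1), str(d1)
--     if len(m1) == 1:
--         m1 = '0' + m1
--     if len(d1) == 1:
--         d1 = '0' + d1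
--     if len(y1) == 2:
--         y1 = '20' + y1
--     return '{}-{}-{}'.format(y1, m1, d1)
--
-- def find_continuous_intervals(sorted_dates):
--     n = len(sorted_dates)
--     if n == 0:
--         return []
--     breaks = [k for k in range(1, n)
--               if sorted_dates[k] != sorted_dates[k - 1]
--               and sorted_dates[k] != next_day(sorted_dates[k - 1])]
--     starts = [0] + breaks
--     ends = [b - 1 for b in breaks] + [n - 1]
--     return list(zip(starts, ends))
-- ===== Notes on version B (the rewrite author's own statement) =====
-- stated objective: alternative
-- what changed: replaces A's nested while-loops (inner loop advancing j, outer loop jumping i past it) with a single flat scan that collects the break indices between non-consecutive adjacent dates and then assembles the intervals from those breakpoints with a zip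
-- outside the precondition, e.g. on find_continuous_intervals(['x', 'x']): A raises ValueError, B returns [(0, 1)]
import Mathlib
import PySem

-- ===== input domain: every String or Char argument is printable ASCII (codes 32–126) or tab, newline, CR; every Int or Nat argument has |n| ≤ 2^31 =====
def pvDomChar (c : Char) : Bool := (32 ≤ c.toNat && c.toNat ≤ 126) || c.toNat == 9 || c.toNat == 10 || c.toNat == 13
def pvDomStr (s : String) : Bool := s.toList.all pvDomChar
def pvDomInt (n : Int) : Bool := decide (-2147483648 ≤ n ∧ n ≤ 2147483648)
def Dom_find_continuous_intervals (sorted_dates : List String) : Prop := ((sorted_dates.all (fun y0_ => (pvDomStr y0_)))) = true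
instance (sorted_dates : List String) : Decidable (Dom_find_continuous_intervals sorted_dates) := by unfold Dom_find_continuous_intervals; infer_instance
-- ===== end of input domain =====

-- B replaces A's nested while-loops with one pass collecting break indices plus an assembly of the intervals from those breakpoints (alternative decomposition, same cost).


-- ===== PORT A =====
-- next_day, shared helper of both Pythons; none exactly where Python's next_day raises
-- (date doesn't split on '-' into exactly three int()-parseable tokens)
def next_day? (date : String) : Option String :=
  match PySem.Str.split? date "-" with
  | none => none
  | some toks =>
    match toks.map PySem.Int.ofStr? with
    | [some y0, some m0, some d0] =>
      let ymd : Int × Int × Int :=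
        if d0 == 28 && m0 == 4 && PySem.Int.mod y0 4 != 0 then (y0, m0 + 1, 1)
        else if d0 == 29 && m0 == 4 then (y0, m0 + 1, 1)
        else if d0 == 30 && (m0 == 2 || m0 == 4 || m0 == 6 || m0 == 9 || m0 == 11) then (y0, m0 + 1, 1)
        else if d0 == 31 && (m0 == 1 || m0 == 3 || m0 == 5 || m0 == 7 || m0 == 8 || m0 == 10) then (y0, m0 + 1, 1)
        else if d0 == 31 && m0 == 12 then (y0 + 1, 1, 1)
        else (y0, m0, d0 + 1)
      let ys := PySem.Int.toStr ymd.1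
      let ms := PySem.Int.toStr ymd.2.1
      let ds := PySem.Int.toStr ymd.2.2
      let ms := if PySem.Str.len ms == 1 then PySem.Str.join "" ["0", ms] else ms
      let ds := if PySem.Str.len ds == 1 then PySem.Str.join "" ["0", ds] else ds
      let ys := if PySem.Str.len ys == 2 then PySem.Str.join "" ["20", ys] else ys
      some (PySem.Str.join "-" [ys, ms, ds])
    | _ => none

-- A's inner while-condition at index j: sorted_dates[j+1] in {sorted_dates[j], next_day(sorted_dates[j])}
def connA (s : List String) (j : Nat) : Bool :=
  (PySem.List.pyGetD s ((j : Int) + 1) "" == PySem.List.pyGetD s (j : Int) "") ||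
  (some (PySem.List.pyGetD s ((j : Int) + 1) "") == next_day? (PySem.List.pyGetD s (j : Int) ""))

-- A's inner while loop: advance j while j < len-1 and connA
def fciInner (s : List String) (j : Nat) : Nat :=
  if h : j < s.length - 1 ∧ connA s j = true then fciInner s (j + 1) else j
termination_by s.length - 1 - j
decreasing_by omega

-- cited by fciOuter's decreasing_by (the loop variable i only grows)
theorem le_fciInner (s : List String) (j : Nat) : j ≤ fciInner s j := by
  by_cases hc : j < s.length - 1 ∧ connA s j = true
  · rw [fciInner, dif_pos hc]
    exact Nat.le_trans (Nat.le_succ _) (le_fciInner s (j + 1))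
  · rw [fciInner, dif_neg hc]
termination_by s.length - 1 - j
decreasing_by omega

-- A's outer while loop
def fciOuter (s : List String) (i : Nat) : List (Int × Int) :=
  if h : i < s.length then
    ((i : Int), ((fciInner s i : Nat) : Int)) :: fciOuter s (fciInner s i + 1)
  else []
termination_by s.length - i
decreasing_by have := le_fciInner s i; omega

def find_continuous_intervals (sorted_dates : List String) : List (Int × Int) :=
  fciOuter sorted_dates 0

-- ===== PORT B =====
-- B's break condition at index k: sorted_dates[k] differs from both sorted_dates[k-1] and its next day
def brkB (s : List String) (k : Int) : Bool :=
  (PySem.List.pyGetD s k "" != PySem.List.pyGetD s (k - 1) "") &&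
  (some (PySem.List.pyGetD s k "") != next_day? (PySem.List.pyGetD s (k - 1) ""))

def find_continuous_intervals_alt (sorted_dates : List String) : List (Int × Int) :=
  let n := sorted_dates.length
  if n = 0 then []
  else
    let breaks := (PySem.List.pyRange 1 (n : Int) 1).filter (brkB sorted_dates)
    let starts := (0 : Int) :: breaks
    let ends := breaks.map (fun b => b - 1) ++ [(n : Int) - 1]
    starts.zip ends

-- ===== PRECONDITION & SPEC =====
-- true iff Python's next_day(s) returns (splits on '-' into exactly three int()-parseable tokens)
def parsesDate (s : String) : Bool :=
  match PySem.Str.split? s "-" with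
  | none => false
  | some toks =>
    match toks.map PySem.Int.ofStr? with
    | [some _, some _, some _] => true
    | _ => false

-- A calls next_day on every element except the last; it raises ValueError iff one of them is not a date.
-- Pre_ is exactly the set of inputs on which Python A returns normally.
def Pre_find_continuous_intervals (sorted_dates : List String) : Prop :=
  sorted_dates.dropLast.all parsesDate = true
instance (sorted_dates : List String) : Decidable (Pre_find_continuous_intervals sorted_dates) := by
  unfold Pre_find_continuous_intervals; infer_instance

def pvWitness_find_continuous_intervals : List String :=
  ["2015-12-31", "2016-01-01", "2016-03-01"]

def Spec_find_continuous_intervals (sorted_dates : List String) (out : List (Int × Int)) : Prop := out = find_continuous_intervals_alt sorted_dates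
instance (sorted_dates : List String) (out : List (Int × Int)) : Decidable (Spec_find_continuous_intervals sorted_dates out) := by unfold Spec_find_continuous_intervals; infer_instance

-- ===== CLAIM (what is proved, stated in full; the proofs are below) =====
def Claim_equal_find_continuous_intervals : Prop := ∀ (sorted_dates : List String), Dom_find_continuous_intervals sorted_dates → Pre_find_continuous_intervals sorted_dates → Spec_find_continuous_intervals sorted_dates (find_continuous_intervals sorted_dates)

-- ===== LEMMAS AND PROOFS =====

-- reference shape: the list of break indices in (i, n-1], and interval assembly from breakpoints
def bks (s : List String) (i : Nat) : List Nat :=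
  (List.range' (i + 1) (s.length - 1 - i)).filter (fun k => !connA s (k - 1))

def assemble (start : Nat) (bs : List Nat) (last : Int) : List (Int × Int) :=
  match bs with
  | [] => [((start : Int), last)]
  | b :: t => ((start : Int), (b : Int) - 1) :: assemble b t last

theorem fciInner_spec (s : List String) (j₀ : Nat) (h : j₀ ≤ s.length - 1) :
    j₀ ≤ fciInner s j₀ ∧ fciInner s j₀ ≤ s.length - 1 ∧
    (∀ k, j₀ ≤ k → k < fciInner s j₀ → connA s k = true) ∧
    (fciInner s j₀ = s.length - 1 ∨ connA s (fciInner s j₀) = false) := by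
  by_cases hc : j₀ < s.length - 1 ∧ connA s j₀ = true
  · have heq : fciInner s j₀ = fciInner s (j₀ + 1) := by rw [fciInner, dif_pos hc]
    have ih := fciInner_spec s (j₀ + 1) (by omega)
    rw [heq]
    refine ⟨by omega, ih.2.1, ?_, ih.2.2.2⟩
    intro k hk1 hk2
    rcases Nat.eq_or_lt_of_le hk1 with rfl | hk1'
    · exact hc.2
    · exact ih.2.2.1 k hk1' hk2
  · have heq : fciInner s j₀ = j₀ := by rw [fciInner, dif_neg hc]
    rw [heq]
    refine ⟨Nat.le_refl _, h, fun k hk1 hk2 => absurd (Nat.lt_of_le_of_lt hk1 hk2) (Nat.lt_irrefl _), ?_⟩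
    by_cases hj : j₀ = s.length - 1
    · exact Or.inl hj
    · right
      by_cases hcn : connA s j₀ = true
      · exact absurd ⟨by omega, hcn⟩ hc
      · simpa using hcn
termination_by s.length - 1 - j₀
decreasing_by omega

theorem outer_eq (s : List String) (i : Nat) (h : i < s.length) :
    fciOuter s i = assemble i (bks s i) ((s.length : Int) - 1) := by
  obtain ⟨h1, h2, h3, h4⟩ := fciInner_spec s i (by omega)
  set j := fciInner s i with hj
  rw [fciOuter, dif_pos h, ← hj]
  by_cases hjn : j = s.length - 1
  · -- final run: no breaks after i, and the recursive call is empty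
    have hb : bks s i = [] := by
      apply List.filter_eq_nil_iff.mpr
      intro k hk
      have hmem := List.mem_range'_1.mp hk
      have := h3 (k - 1) (by omega) (by omega)
      simp [this]
    have hend : fciOuter s (j + 1) = [] := by rw [fciOuter, dif_neg (by omega)]
    rw [hb, hend]
    simp only [assemble]
    have : ((j : Nat) : Int) = (s.length : Int) - 1 := by omega
    rw [this]
  · -- a break at j+1 closes (i, j) and opens a run at j+1
    have hjlt : j < s.length - 1 := by omega
    have hcf : connA s j = false := h4.resolve_left hjn
    have hsplit : bks s i = (j + 1) :: bks s (j + 1) := by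
      unfold bks
      have hlen : s.length - 1 - i = (j - i) + ((s.length - 1 - j - 1) + 1) := by omega
      rw [hlen, ← List.range'_append]
      have hst : (i + 1) + 1 * (j - i) = j + 1 := by omega
      rw [hst, List.filter_append, List.range'_succ, List.filter_cons]
      have hfirst :
          (List.range' (i + 1) (j - i)).filter (fun k => !connA s (k - 1)) = [] := by
        apply List.filter_eq_nil_iff.mpr
        intro k hk
        have hmem := List.mem_range'_1.mp hk
        have := h3 (k - 1) (by omega) (by omega)
        simp [this]
      rw [hfirst]
      have harg : j + 1 - 1 = j := by omega
      have htail : j + 1 + 1 = (j + 1) + 1 := rfl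
      simp only [harg, hcf, Bool.not_false, if_pos, List.nil_append, Nat.sub_sub]
      rfl
    rw [hsplit]
    simp only [assemble]
    have hca : (((j + 1 : Nat)) : Int) - 1 = ((j : Nat) : Int) := by omega
    rw [hca]
    have ih := outer_eq s (j + 1) (by omega)
    rw [ih]
termination_by s.length - i
decreasing_by omega

-- B's Int-valued break test agrees with the negation of A's while-condition on in-range indices
theorem brk_cast (s : List String) (k : Nat) (h1 : 1 ≤ k) :
    brkB s (k : Int) = !connA s (k - 1) := by
  unfold brkB connA
  have e1 : (((k - 1 : Nat)) : Int) + 1 = (k : Int) := by omega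
  have e2 : (((k - 1 : Nat)) : Int) = (k : Int) - 1 := by omega
  rw [e1, e2]
  simp only [bne, Bool.not_or]

theorem pyRange_one_to (n : Nat) (h : 1 ≤ n) :
    PySem.List.pyRange 1 (n : Int) 1 = (List.range' 1 (n - 1)).map (fun k : Nat => (k : Int)) := by
  have hsplit := PySem.List.pyRange_one_append 0 1 (n : Int) (by omega) (by omega)
  have h0 := PySem.List.pyRange_zero_natCast n
  have h01 : PySem.List.pyRange 0 1 1 = [(0 : Int)] := by decide
  have hr : List.range n = 0 :: List.range' 1 (n - 1) := by
    cases n with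
    | zero => omega
    | succ m => simp [List.range_eq_range', List.range'_succ]
  rw [h0, hr] at hsplit
  simpa [h01] using hsplit.symm

theorem zip_assemble (last : Int) (bs : List Nat) (start : Nat) :
    (((start : Int)) :: bs.map (fun b : Nat => (b : Int))).zip
      ((bs.map (fun b : Nat => (b : Int))).map (fun b => b - 1) ++ [last]) =
    assemble start bs last := by
  induction bs generalizing start with
  | nil => simp [assemble]
  | cons b t ih =>
    simp only [List.map_cons, List.cons_append, List.zip_cons_cons, assemble]
    rw [ih b]

theorem alt_eq (s : List String) (h : s.length ≠ 0) :
    find_continuous_intervals_alt s = assemble 0 (bks s 0) ((s.length : Int) - 1) := by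
  unfold find_continuous_intervals_alt
  rw [if_neg h]
  have hrange := pyRange_one_to s.length (by omega)
  have hfilter :
      (PySem.List.pyRange 1 (s.length : Int) 1).filter (brkB s) =
        (bks s 0).map (fun b : Nat => (b : Int)) := by
    rw [hrange, List.filter_map]
    unfold bks
    rw [List.filter_congr (q := fun k : Nat => !connA s (k - 1)) ?_]
    · simp
    · intro k hk
      have hmem := List.mem_range'_1.mp hk
      simpa [Function.comp] using brk_cast s k (by omega)
  simp only [hfilter]
  exact zip_assemble ((s.length : Int) - 1) (bks s 0) 0

-- ===== VERDICT (by name: the statement is the Claim_ definition above) =====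
theorem find_continuous_intervals_spec : Claim_equal_find_continuous_intervals := by
  intro s _hdom _hpre
  unfold Spec_find_continuous_intervals
  by_cases hn : s.length = 0
  · have ha : find_continuous_intervals s = [] := by
      unfold find_continuous_intervals
      rw [fciOuter, dif_neg (by omega)]
    have hb : find_continuous_intervals_alt s = [] := by
      unfold find_continuous_intervals_alt
      rw [if_pos hn]
    rw [ha, hb]
  · rw [alt_eq s hn]
    exact outer_eq s 0 (by omega)
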